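-- pv_equiv track=rewrite | github.com/Ubastic/coding-challenges | solutions/python/6 kyu/IntroToArt/solution.py | get_w
-- ===== SOURCE A (Python) =====
-- def get_w(height):
--     if height <= 1:
--         return []
--
--     middle = height * 2 - 1
--     arr = [[' '] * (height * 4 - 3) for _ in range(height)]
--     for i, a in enumerate(arr):
--         a[i] = a[-i - 1] = a[middle - i - 1] = a[middle - 1 + i] = '*'
--
--     return [''.join(a) for a in arr]
-- ===== SOURCE B (Python) =====
-- def get_w(height):
--     if height <= 1:
--         return []
--     w = 4 * height - 3
--     m = 2 * height - 2
--     rows = []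
--     for i in range(height):
--         parts = []
--         prev = -1
--         for c in sorted({i, m - i, m + i, w - 1 - i}):
--             parts.append(' ' * (c - prev - 1))
--             parts.append('*')
--             prev = c
--         parts.append(' ' * (w - 1 - prev))
--         rows.append(''.join(parts))
--     return rows
-- ===== Notes on version B (the rewrite author's own statement) =====
-- stated objective: alternative
-- what changed: B builds each row directly from the sorted distinct star-column positions by concatenating gap/star string segments, instead of allocating a mutable 2D character grid, assigning four cells per row, and joining every row character by character; intended as faster (measured ~4-5x at large heights, below the harness's confirmation threshold).
import Mathlib
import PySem

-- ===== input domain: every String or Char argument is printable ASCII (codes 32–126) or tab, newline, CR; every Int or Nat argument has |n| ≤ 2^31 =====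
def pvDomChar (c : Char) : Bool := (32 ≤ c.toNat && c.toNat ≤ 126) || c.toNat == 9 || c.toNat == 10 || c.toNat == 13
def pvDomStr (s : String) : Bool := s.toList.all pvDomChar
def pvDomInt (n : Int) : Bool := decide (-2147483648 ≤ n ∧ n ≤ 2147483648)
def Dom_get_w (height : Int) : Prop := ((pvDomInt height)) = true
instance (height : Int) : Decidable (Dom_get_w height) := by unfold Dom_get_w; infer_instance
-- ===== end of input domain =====

-- B builds each row from the sorted distinct star columns by concatenating gap/star segments,
-- instead of A's mutable 2D char grid with four cell assignments per row (alternative decomposition).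

-- ===== PORT A =====
def get_w (height : Int) : List String :=
  if height ≤ 1 then []
  else
    let middle := height * 2 - 1
    let arr : List (List Char) :=
      (PySem.List.pyRange 0 height 1).map (fun _ => PySem.List.pyRepeat [' '] (height * 4 - 3))
    let arr2 : List (List Char) :=
      (PySem.List.enumerate arr).map (fun p =>
        let i := p.1
        let a := p.2
        let a := PySem.List.pySetD a i '*'
        let a := PySem.List.pySetD a (-i - 1) '*'
        let a := PySem.List.pySetD a (middle - i - 1) '*'
        let a := PySem.List.pySetD a (middle - 1 + i) '*'
        a)
    arr2.map (fun a => String.mk a)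

-- ===== PORT B =====
def get_w_alt (height : Int) : List String :=
  if height ≤ 1 then []
  else
    let w := 4 * height - 3
    let m := 2 * height - 2
    (PySem.List.pyRange 0 height 1).map (fun i =>
      let cols := PySem.List.sorted (PySem.Set.ofList [i, m - i, m + i, w - 1 - i]) (fun x => x) false
      let st := cols.foldl
        (fun (st : List (List Char) × Int) c =>
          (st.1 ++ [PySem.List.pyRepeat [' '] (c - st.2 - 1), ['*']], c)) ([], -1)
      String.mk ((st.1 ++ [PySem.List.pyRepeat [' '] (w - 1 - st.2)]).flatten))

-- ===== PRECONDITION & SPEC =====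
def Spec_get_w (height : Int) (out : List String) : Prop := out = get_w_alt height
instance (height : Int) (out : List String) : Decidable (Spec_get_w height out) := by unfold Spec_get_w; infer_instance

-- ===== CLAIM (what is proved, stated in full; the proofs are below) =====
def Claim_equal_get_w : Prop := ∀ (height : Int), Dom_get_w height → Spec_get_w height (get_w height)

-- ===== LEMMAS AND PROOFS =====

-- pySetD with an in-range NEGATIVE Python index resolves to List.set at length + i
theorem pySetD_neg_eq_set {α : Type} (xs : List α) (i : Int) (v : α)
    (hneg : i < 0) (hl : -(xs.length : Int) ≤ i) :
    PySem.List.pySetD xs i v = xs.set (xs.length - (-i).toNat) v := by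
  simp [PySem.List.pySetD, PySem.List.pySet?, PySem.List.pyIdx?, not_le.mpr hneg, hl]

-- a map of a constant over any list is a replicate
theorem map_const_eq_replicate {α β : Type} (l : List α) (b : β) :
    l.map (fun _ => b) = List.replicate l.length b := by
  induction l with
  | nil => rfl
  | cons x xs ih => simp [ih, List.replicate_succ]

-- B's gap/star segment loop over a strictly increasing in-range column list renders
-- exactly the characteristic-function row over [prev+1, w)
theorem segBuild (w : Int) (cols : List Int) (prev : Int) (acc : List (List Char))
    (hs : List.Pairwise (· < ·) cols)
    (hlow : ∀ c ∈ cols, prev < c)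
    (hhi : ∀ c ∈ cols, c < w) :
    ((cols.foldl
        (fun (st : List (List Char) × Int) c =>
          (st.1 ++ [PySem.List.pyRepeat [' '] (c - st.2 - 1), ['*']], c)) (acc, prev)).1
      ++ [PySem.List.pyRepeat [' ']
            (w - 1 - (cols.foldl
              (fun (st : List (List Char) × Int) c =>
                (st.1 ++ [PySem.List.pyRepeat [' '] (c - st.2 - 1), ['*']], c)) (acc, prev)).2)]).flatten
    = acc.flatten ++ (PySem.List.pyRange (prev + 1) w 1).map
        (fun j => if j ∈ cols then '*' else ' ') := by
  induction cols generalizing prev acc with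
  | nil =>
      simp only [List.foldl_nil, List.flatten_append, List.flatten_cons, List.flatten_nil,
        List.append_nil, PySem.List.pyRepeat_singleton]
      rw [List.map_congr_left (g := fun _ => ' ') (fun x _ => by simp)]
      rw [map_const_eq_replicate, PySem.List.length_pyRange_one,
        show w - (prev + 1) = w - 1 - prev from by omega]
  | cons c cs ih =>
      have hc : prev < c := hlow c (by simp)
      have hcw : c < w := hhi c (by simp)
      rw [List.foldl_cons]
      rw [ih (prev := c) (acc := acc ++ [PySem.List.pyRepeat [' '] (c - prev - 1), ['*']])
          (List.Pairwise.of_cons hs)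
          (fun x hx => List.rel_of_pairwise_cons hs hx)
          (fun x hx => hhi x (by simp [hx]))]
      rw [PySem.List.pyRange_one_append (prev + 1) c w (by omega) (by omega)]
      rw [PySem.List.pyRange_one_cons (by omega : c < w)]
      simp only [List.map_append, List.map_cons, List.flatten_append, List.flatten_cons,
        List.flatten_nil, List.append_nil, PySem.List.pyRepeat_singleton, List.append_assoc]
      congr 1
      have hgap : (PySem.List.pyRange (prev + 1) c 1).map
          (fun j => if j ∈ c :: cs then '*' else ' ')
          = List.replicate (c - prev - 1).toNat ' ' := by
        rw [List.map_congr_left (g := fun _ => ' ')]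
        · rw [map_const_eq_replicate, PySem.List.length_pyRange_one,
            show c - (prev + 1) = c - prev - 1 from by omega]
        · intro x hx
          rw [PySem.List.mem_pyRange_one] at hx
          have hxc : x ∉ c :: cs := by
            intro hmem
            rcases List.mem_cons.mp hmem with h | h
            · omega
            · exact absurd (List.rel_of_pairwise_cons hs h) (by omega)
          simp [hxc]
      rw [hgap]
      congr 1
      have hstar : (if c ∈ c :: cs then '*' else ' ') = '*' := by simp
      rw [hstar]
      simp only [List.singleton_append]
      congr 1
      apply List.map_congr_left
      intro x hx
      rw [PySem.List.mem_pyRange_one] at hx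
      have hiff : x ∈ c :: cs ↔ x ∈ cs := by
        constructor
        · intro h; rcases List.mem_cons.mp h with h | h
          · omega
          · exact h
        · intro h; exact List.mem_cons_of_mem _ h
      simp [hiff]

-- ===== VERDICT (by name: the statement is the Claim_ definition above) =====
theorem get_w_spec : Claim_equal_get_w := by
  intro height _
  unfold Spec_get_w get_w get_w_alt
  by_cases hle : height ≤ 1
  · simp [hle]
  · simp only [if_neg hle]
    have h2 : 2 ≤ height := by omega
    apply List.ext_getElem
    · simp
    · intro k hk hk'
      have hkb : k < (height - 0).toNat := by simpa using hk
      have hkh : (k : Int) < height := by omega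
      have hn : ((height * 4 - 3).toNat : Int) = height * 4 - 3 := by omega
      simp only [List.getElem_map, PySem.List.getElem_enumerate,
        PySem.List.getElem_pyRange_one, zero_add]
      -- the B row: segments render the characteristic function of the sorted column set
      rw [segBuild (4 * height - 3)
            (PySem.List.sorted (PySem.Set.ofList
              [(k : Int), 2 * height - 2 - (k : Int), 2 * height - 2 + (k : Int),
               4 * height - 3 - 1 - (k : Int)]) (fun x => x) false) (-1) []
            (PySem.List.sorted_ofList_pairwise_lt _)
            (by intro c hc
                rw [PySem.List.mem_sorted, PySem.Set.mem_ofList] at hc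
                simp only [List.mem_cons, List.not_mem_nil, or_false] at hc
                omega)
            (by intro c hc
                rw [PySem.List.mem_sorted, PySem.Set.mem_ofList] at hc
                simp only [List.mem_cons, List.not_mem_nil, or_false] at hc
                omega)]
      simp only [List.flatten_nil, List.nil_append, neg_add_cancel,
        PySem.List.pyRepeat_singleton]
      -- the A row: four List.set's on a replicate
      rw [PySem.List.pySetD_of_nonneg _ '*' (show (0:Int) ≤ (k : Int) from by omega)]
      rw [pySetD_neg_eq_set _ (-(k : Int) - 1) _ (by omega) (by simp; omega)]
      rw [PySem.List.pySetD_of_nonneg _ '*' (show (0:Int) ≤ height * 2 - 1 - (k : Int) - 1 from by omega)]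
      rw [PySem.List.pySetD_of_nonneg _ '*' (show (0:Int) ≤ height * 2 - 1 - 1 + (k : Int) from by omega)]
      congr 1
      apply List.ext_getElem
      · simp; omega
      · intro j hj hj'
        simp only [List.getElem_set, List.getElem_replicate, List.length_set,
          List.length_replicate, List.getElem_map, PySem.List.getElem_pyRange_one, zero_add] at *
        simp only [PySem.List.mem_sorted, PySem.Set.mem_ofList, List.mem_cons,
          List.not_mem_nil, or_false]
        split_ifs <;> first | rfl | (exfalso; omega)
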